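-- pv_equiv track=rewrite | github.com/Alintermans/Thesis | Experiments/ConstrainedParodieGenerator/SongUtils.py | get_final_word_of_line
-- ===== SOURCE A (Python) =====
-- def get_final_word_of_line(line):
--     line = line.replace("’", "'")
--     words = line.split(" ")
--     if words == []:
--         return None
--
--     if words[-1] == "":
--         words = words[:-1]
--         if words == []:
--             return None
--
--
--     #remove all punctuation marks and symbols that don't belong to a word
--     not_to_end_with = ["’","'",".", ",", "!", "?", ";", ":", "-", "'", "\"", "(", ")", "[", "]", "{", "}",'``' , '&', '#', '*', '$', '£', '`', '+', '\n', '_', ""]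
--     while words[-1] in not_to_end_with:
--         words = words[:-1]
--         if words == []:
--             return None
--     #remove punctutation marks that are at the end of the word
--     while words[-1][-1] in not_to_end_with:
--         words[-1] = words[-1][:-1]
--         if words[-1] == "":
--             words = words[:-1]
--             if words == []:
--                 return None
--
--     return words[-1]
-- ===== SOURCE B (Python) =====
-- # Right-to-left index scan: strip trailing spaces/punctuation, then cut at the last space.
-- def get_final_word_of_line(line):
--     line = line.replace("\u2019", "'")
--     removable = set("'.,!?;:-\"()[]{}&#*$\u00a3`+\n_ ")
--     i = len(line)
--     while i > 0 and line[i-1] in removable: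
--         i -= 1
--     if i == 0:
--         return None
--     j = line.rfind(" ", 0, i)
--     return line[j+1:i]
-- ===== Notes on version B (the rewrite author's own statement) =====
-- stated objective: simpler
-- what changed: A splits the line into a word list and runs two destructive while-loops (dropping whole junk words, then stripping trailing punctuation of the last word); B never builds a word list: one right-to-left index scan past trailing spaces/punctuation, then an rfind of the space character cuts out the final word.
-- outside the precondition, e.g. on get_final_word_of_line('a  ..'): A raises IndexError, B returns 'a'
import Mathlib
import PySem

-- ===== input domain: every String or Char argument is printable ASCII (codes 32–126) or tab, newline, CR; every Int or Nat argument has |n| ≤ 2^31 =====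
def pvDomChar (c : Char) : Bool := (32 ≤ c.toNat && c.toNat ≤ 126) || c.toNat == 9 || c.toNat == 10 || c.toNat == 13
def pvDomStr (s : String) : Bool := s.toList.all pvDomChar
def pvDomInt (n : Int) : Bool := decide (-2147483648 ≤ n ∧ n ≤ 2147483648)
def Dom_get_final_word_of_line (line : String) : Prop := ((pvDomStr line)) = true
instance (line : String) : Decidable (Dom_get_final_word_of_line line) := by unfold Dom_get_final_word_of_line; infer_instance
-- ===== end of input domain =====

-- B replaces A's word-list surgery (split, two destructive while loops over the list tail) by a single
-- right-to-left character scan; return values only (neither mutates anything observable).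

-- ===== PORT A =====
-- Python strings are carried as List Char (the PySem convention); the word list `words` is kept
-- REVERSED (head = Python's words[-1]), so `words[:-1]` is `tail` — same states, same steps.
def notToEndWith : List (List Char) :=
  [['’'], ['\''], ['.'], [','], ['!'], ['?'], [';'], [':'], ['-'], ['\''], ['"'], ['('], [')'],
   ['['], [']'], ['{'], ['}'], ['`','`'], ['&'], ['#'], ['*'], ['$'], ['£'], ['`'], ['+'], ['\n'], ['_'], []]

-- while words[-1] in not_to_end_with: words = words[:-1]; if words == []: return None
def loopA1 : List (List Char) → Option (List (List Char))
  | [] => none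
  | w :: ws => if notToEndWith.contains w then loopA1 ws else some (w :: ws)

-- while words[-1][-1] in not_to_end_with: words[-1] = words[-1][:-1]; …
def loopA2 : List (List Char) → Option (List Char)
  | [] => none
  | w :: ws =>
    match w.getLast? with
    | none => none   -- Python raises IndexError here (words[-1][-1] on ""); Pre_ excludes these inputs
    | some c =>
      if notToEndWith.contains [c] then
        if hdrop : w.dropLast = [] then
          match ws with
          | [] => none
          | v :: vs => loopA2 (v :: vs)
        else loopA2 (w.dropLast :: ws)
      else some w
termination_by l => (l.map List.length).sum + l.length
decreasing_by
  · simp; omega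
  · have hw : w ≠ [] := fun e => hdrop (by rw [e]; rfl)
    have h1 : w.dropLast.length = w.length - 1 := List.length_dropLast
    have h2 : 0 < w.length := List.length_pos_of_ne_nil hw
    simp; omega

def get_final_word_of_line (line : String) : Option String :=
  let cs := (PySem.Str.replace line "’" "'").toList
  let words := (PySem.Chars.splitOn cs [' ']).reverse
  match words with
  | [] => none                       -- Python's `if words == []` (split never returns []; kept faithfully)
  | w :: ws =>
    let words2 := if w = [] then ws else w :: ws   -- if words[-1] == "": words = words[:-1]
    match words2 with
    | [] => none
    | w :: ws =>
      match loopA1 (w :: ws) with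
      | none => none
      | some r => (loopA2 r).map String.ofList

-- ===== PORT B =====
-- Source B scans indices i = len(line) … 0 from the right; the port recurses over the REVERSED char
-- list (head = line[i-1]) — the same scan, then cuts the word at the first space (= rfind).
def removableB : List Char :=
  ['\'', '.', ',', '!', '?', ';', ':', '-', '"', '(', ')', '[', ']', '{', '}', '&', '#', '*', '$',
   '£', '`', '+', '\n', '_', ' ']

def stripRev : List Char → List Char
  | [] => []
  | c :: cs => if removableB.contains c then stripRev cs else c :: cs

def wordRev : List Char → List Char
  | [] => []
  | c :: cs => if c = ' ' then [] else c :: wordRev cs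

def get_final_word_of_line_alt (line : String) : Option String :=
  let rcs := (PySem.Str.replace line "’" "'").toList.reverse
  match stripRev rcs with
  | [] => none
  | r => some (String.ofList (wordRev r).reverse)

-- ===== PRECONDITION & SPEC =====
def punctA : List Char :=
  ['\'', '.', ',', '!', '?', ';', ':', '-', '"', '(', ')', '[', ']', '{', '}', '&', '#', '*', '$',
   '£', '`', '+', '\n', '_']

def isPunctWord (w : List Char) : Bool := (!w.isEmpty) && w.all (punctA.contains ·)

-- A raises IndexError exactly when, among the space-separated pieces read from the right, a maximal
-- run of droppable pieces (members of not_to_end_with, then nonempty all-punctuation pieces) is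
-- followed immediately by an empty piece (e.g. "a  .."): A pops the stripped-empty word and indexes
-- ""[-1]. Pre_ excludes exactly those inputs.
def pyCrashes (line : String) : Bool :=
  let rev := (PySem.Chars.splitOn (PySem.Str.replace line "’" "'").toList [' ']).reverse
  (((rev.dropWhile (notToEndWith.contains ·)).dropWhile isPunctWord).head? == some [])

def Pre_get_final_word_of_line (line : String) : Prop := pyCrashes line = false
instance (line : String) : Decidable (Pre_get_final_word_of_line line) := by
  unfold Pre_get_final_word_of_line; infer_instance

def pvWitness_get_final_word_of_line : String := "Hello, world!"

def Spec_get_final_word_of_line (line : String) (out : Option String) : Prop :=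
  out = get_final_word_of_line_alt line
instance (line : String) (out : Option String) : Decidable (Spec_get_final_word_of_line line out) := by
  unfold Spec_get_final_word_of_line; infer_instance

-- ===== CLAIM (what is proved, stated in full; the proofs are below) =====
def Claim_equal_get_final_word_of_line : Prop :=
  ∀ (line : String), Dom_get_final_word_of_line line → Pre_get_final_word_of_line line →
    Spec_get_final_word_of_line line (get_final_word_of_line line)

-- ===== LEMMAS AND PROOFS =====

-- spec-level split on a single space, and its join
def splitSp : List Char → List (List Char)
  | [] => [[]]
  | c :: cs =>
    if c = ' ' then [] :: splitSp cs
    else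
      match splitSp cs with
      | [] => [[c]]            -- unreachable: splitSp never returns []
      | w :: ws => (c :: w) :: ws

def joinSp : List (List Char) → List Char
  | [] => []
  | [w] => w
  | w :: v :: ws => w ++ ' ' :: joinSp (v :: ws)

def sepJ (xs : List (List Char)) : List Char :=
  match xs with
  | [] => []
  | x :: xs' => ' ' :: joinSp (x :: xs')

lemma joinSp_cons (x : List Char) (xs : List (List Char)) :
    joinSp (x :: xs) = x ++ sepJ xs := by
  cases xs <;> simp [joinSp, sepJ]

lemma splitSp_ne_nil (cs : List Char) : splitSp cs ≠ [] := by
  induction cs with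
  | nil => simp [splitSp]
  | cons c cs ih =>
    simp only [splitSp]
    split_ifs
    · simp
    · cases h : splitSp cs <;> simp

lemma go_step (n : Nat) (c : Char) (rest cur : List Char) (acc : List (List Char)) :
    PySem.Chars.splitOn.go [' '] (n+1) (c::rest) cur acc =
      if c = ' ' then PySem.Chars.splitOn.go [' '] n rest [] (cur.reverse :: acc)
      else PySem.Chars.splitOn.go [' '] n rest (c :: cur) acc := by
  rw [PySem.Chars.splitOn.go.eq_def]
  by_cases hc : c = ' ' <;> simp [List.isPrefixOf, hc]
  intro h; exact absurd h.symm hc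

lemma splitOn_go_space (fuel : Nat) : ∀ (l cur : List Char) (acc : List (List Char)),
    l.length ≤ fuel →
    PySem.Chars.splitOn.go [' '] fuel l cur acc =
      acc.reverse ++ (match splitSp l with
                      | [] => []
                      | w :: ws => (cur.reverse ++ w) :: ws) := by
  induction fuel with
  | zero =>
    intro l cur acc hl
    have : l = [] := by cases l <;> simp_all
    subst this
    simp [PySem.Chars.splitOn.go, splitSp]
  | succ n ih =>
    intro l cur acc hl
    cases l with
    | nil => rw [PySem.Chars.splitOn.go.eq_def]; simp [splitSp]
    | cons c rest =>
      rw [go_step]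
      by_cases hc : c = ' '
      · subst hc
        rw [ih rest [] _ (by simpa using hl)]
        simp only [splitSp, if_pos]
        cases h : splitSp rest <;> simp
      · rw [ih rest (c :: cur) _ (by simpa using hl)]
        simp only [splitSp, if_neg hc]
        cases h : splitSp rest with
        | nil => exact absurd h (splitSp_ne_nil rest)
        | cons w ws => simp

lemma splitOn_space (cs : List Char) : PySem.Chars.splitOn cs [' '] = splitSp cs := by
  rw [PySem.Chars.splitOn, splitOn_go_space (cs.length+1) cs [] [] (by omega)]
  cases h : splitSp cs with
  | nil => exact absurd h (splitSp_ne_nil cs)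
  | cons w ws => simp

lemma join_splitSp (cs : List Char) : joinSp (splitSp cs) = cs := by
  induction cs with
  | nil => simp [splitSp, joinSp]
  | cons c cs ih =>
    simp only [splitSp]
    by_cases hc : c = ' '
    · subst hc
      simp only [if_pos rfl]
      cases h : splitSp cs with
      | nil => exact absurd h (splitSp_ne_nil cs)
      | cons w ws => rw [h] at ih; simp [joinSp, ih]
    · simp only [if_neg hc]
      cases h : splitSp cs with
      | nil => exact absurd h (splitSp_ne_nil cs)
      | cons w ws =>
        rw [h] at ih
        cases ws with
        | nil => simpa [joinSp] using congrArg (c :: ·) ih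
        | cons v vs =>
          simp only [joinSp] at ih ⊢
          simp [← ih]

lemma no_space_splitSp (cs : List Char) : ∀ w ∈ splitSp cs, ' ' ∉ w := by
  induction cs with
  | nil => simp [splitSp]
  | cons c cs ih =>
    simp only [splitSp]
    by_cases hc : c = ' '
    · subst hc; simp only [if_pos rfl]
      intro w hw
      rcases List.mem_cons.mp hw with h | h
      · simp [h]
      · exact ih w h
    · simp only [if_neg hc]
      cases h : splitSp cs with
      | nil => exact absurd h (splitSp_ne_nil cs)
      | cons v vs =>
        intro w hw
        rcases List.mem_cons.mp hw with h2 | h2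
        · subst h2
          intro hm
          rcases List.mem_cons.mp hm with h3 | h3
          · exact hc h3.symm
          · exact ih v (h ▸ List.mem_cons_self ..) h3
        · exact ih w (h ▸ List.mem_cons_of_mem _ h2)

lemma subset_splitSp (cs : List Char) : ∀ w ∈ splitSp cs, ∀ c ∈ w, c ∈ cs := by
  induction cs with
  | nil => simp [splitSp]
  | cons c cs ih =>
    simp only [splitSp]
    by_cases hc : c = ' '
    · subst hc; simp only [if_pos rfl]
      intro w hw a ha
      rcases List.mem_cons.mp hw with h | h
      · simp [h] at ha
      · exact List.mem_cons_of_mem _ (ih w h a ha)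
    · simp only [if_neg hc]
      cases h : splitSp cs with
      | nil => exact absurd h (splitSp_ne_nil cs)
      | cons v vs =>
        intro w hw a ha
        rcases List.mem_cons.mp hw with h2 | h2
        · subst h2
          rcases List.mem_cons.mp ha with h3 | h3
          · simp [h3]
          · exact List.mem_cons_of_mem _ (ih v (h ▸ List.mem_cons_self ..) a h3)
        · exact List.mem_cons_of_mem _ (ih w (h ▸ List.mem_cons_of_mem _ h2) a ha)

lemma joinSp_append_single (xs : List (List Char)) (y : List Char) (h : xs ≠ []) :
    joinSp (xs ++ [y]) = joinSp xs ++ ' ' :: y := by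
  induction xs with
  | nil => exact absurd rfl h
  | cons x xs ih =>
    cases xs with
    | nil => simp [joinSp]
    | cons v vs =>
      have := ih (by simp)
      simp only [List.cons_append, joinSp] at this ⊢
      rw [this]
      simp

lemma joinSp_reverse (l : List (List Char)) :
    (joinSp l).reverse = joinSp (l.reverse.map List.reverse) := by
  induction l with
  | nil => simp [joinSp]
  | cons w l ih =>
    cases l with
    | nil => simp [joinSp]
    | cons v vs =>
      have h1 : joinSp (w :: v :: vs) = w ++ ' ' :: joinSp (v :: vs) := rfl
      have hr : (w :: v :: vs).reverse.map List.reverse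
          = ((v :: vs).reverse.map List.reverse) ++ [w.reverse] := by simp
      rw [h1, hr, joinSp_append_single _ _ (by simp), ← ih]
      simp

lemma replace_go_id (fuel : Nat) : ∀ (l acc : List Char), '’' ∉ l →
    PySem.Chars.replace.go ['’'] ['\''] fuel l acc = acc.reverse ++ l := by
  induction fuel with
  | zero => intro l acc _; rw [PySem.Chars.replace.go.eq_def]
  | succ n ih =>
    intro l acc hl
    cases l with
    | nil => rw [PySem.Chars.replace.go.eq_def]; simp
    | cons c t =>
      have hc : c ≠ '’' := fun e => hl (e ▸ List.mem_cons_self ..)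
      rw [PySem.Chars.replace.go.eq_def]
      have hpre : List.isPrefixOf ['’'] (c :: t) = false := by
        simp [List.isPrefixOf]
        exact fun e => absurd e.symm hc
      simp only [hpre, Bool.false_eq_true, if_false]
      rw [ih t (c :: acc) (fun hm => hl (List.mem_cons_of_mem _ hm))]
      simp

lemma replace_id (cs : List Char) (h : '’' ∉ cs) :
    PySem.Chars.replace cs ['’'] ['\''] = cs := by
  rw [PySem.Chars.replace]
  simp only [List.isEmpty_cons, Bool.false_eq_true, if_false]
  rw [replace_go_id cs.length cs [] h]
  simp

-- character-set bookkeeping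
set_option maxHeartbeats 1000000 in
lemma mem_single_iff (c : Char) (h : c ≠ '’') :
    notToEndWith.contains [c] = true ↔ punctA.contains c = true := by
  constructor
  · intro hm
    have h2 : [c] ∈ notToEndWith := by simpa using hm
    simp [notToEndWith] at h2
    simp [punctA]
    tauto
  · intro hm
    have h2 : c ∈ punctA := by simpa using hm
    simp [punctA] at h2
    simp [notToEndWith]
    tauto

set_option maxHeartbeats 1000000 in
lemma removableB_iff (c : Char) :
    removableB.contains c = true ↔ (punctA.contains c = true ∨ c = ' ') := by
  constructor
  · intro hm
    have h2 : c ∈ removableB := by simpa using hm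
    simp [removableB] at h2
    simp [punctA]
    tauto
  · intro hm
    simp [removableB]
    rcases hm with hm | hm
    · have h2 : c ∈ punctA := by simpa using hm
      simp [punctA] at h2
      tauto
    · tauto

lemma notToEnd_all_removable (w : List Char) (hw : notToEndWith.contains w = true) (h : '’' ∉ w) :
    ∀ c ∈ w, removableB.contains c = true := by
  have hw' : w ∈ notToEndWith := by simpa using hw
  fin_cases hw' <;> simp_all <;> decide

lemma stripRev_drop (xs ys : List Char) (h : ∀ c ∈ xs, removableB.contains c = true) :
    stripRev (xs ++ ys) = stripRev ys := by
  induction xs with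
  | nil => simp
  | cons c t ih =>
    simp only [List.cons_append, stripRev, h c (List.mem_cons_self ..), if_pos]
    exact ih fun a ha => h a (List.mem_cons_of_mem _ ha)

lemma wordRev_no_space (xs : List Char) (h : ' ' ∉ xs) : wordRev xs = xs := by
  induction xs with
  | nil => rfl
  | cons c t ih =>
    have hc : c ≠ ' ' := fun e => h (e ▸ List.mem_cons_self ..)
    simp only [wordRev, if_neg hc]
    rw [ih fun hm => h (List.mem_cons_of_mem _ hm)]

lemma wordRev_until_space (xs ys : List Char) (h : ' ' ∉ xs) :
    wordRev (xs ++ ' ' :: ys) = xs := by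
  induction xs with
  | nil => simp [wordRev]
  | cons c t ih =>
    have hc : c ≠ ' ' := fun e => h (e ▸ List.mem_cons_self ..)
    simp only [List.cons_append, wordRev, if_neg hc]
    rw [ih fun hm => h (List.mem_cons_of_mem _ hm)]

def goodW (w : List Char) : Prop := ' ' ∉ w ∧ '’' ∉ w

def Bexpr (rev : List (List Char)) : Option (List Char) :=
  match stripRev (joinSp (rev.map List.reverse)) with
  | [] => none
  | r => some (wordRev r).reverse

lemma isPunctWord_dropLast (w : List Char) (hw : w ≠ []) (hd : w.dropLast ≠ [])
    (hc : punctA.contains (w.getLast hw) = true) :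
    isPunctWord w.dropLast = isPunctWord w := by
  have hmem : w.getLast hw ∈ punctA := by simpa using hc
  have hde : w.dropLast.isEmpty = false := by simpa using hd
  conv_rhs => rw [← List.dropLast_append_getLast hw]
  simp [isPunctWord, List.all_append, hmem, hde]

lemma A2_eq (n : Nat) : ∀ (rev : List (List Char)),
    (rev.map List.length).sum + rev.length ≤ n →
    (∀ w ∈ rev, goodW w) →
    rev.head? ≠ some ([] : List Char) →
    (rev.dropWhile isPunctWord).head? ≠ some ([] : List Char) →
    loopA2 rev = Bexpr rev := by
  induction n with
  | zero =>
    intro rev hn _ _ _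
    have : rev = [] := by cases rev <;> simp_all
    subst this
    simp [loopA2, Bexpr, joinSp, stripRev]
  | succ n ih =>
    intro rev hn hg hh hok
    cases rev with
    | nil => simp [loopA2, Bexpr, joinSp, stripRev]
    | cons w ws =>
      have hw : w ≠ [] := fun e => hh (by simp [e])
      obtain ⟨hsp, hcu⟩ := hg w (List.mem_cons_self ..)
      have hL : w.getLast? = some (w.getLast hw) := List.getLast?_eq_some_getLast hw
      set c := w.getLast hw with hcdef
      have hcmem : c ∈ w := List.getLast_mem hw
      have hc9 : c ≠ '’' := fun e => hcu (e ▸ hcmem)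
      have hwdec : w = w.dropLast ++ [c] := (List.dropLast_append_getLast hw).symm
      have hwrev : w.reverse = c :: w.dropLast.reverse := by
        conv_lhs => rw [hwdec]
        simp
      rw [loopA2.eq_def]
      simp only [hL]

      have hBe : Bexpr (w :: ws) =
          (match stripRev (w.reverse ++ sepJ (ws.map List.reverse)) with
           | [] => none
           | r => some (wordRev r).reverse) := by
        simp [Bexpr, joinSp_cons]
      by_cases hbc : notToEndWith.contains [c] = true
      · have hcp : punctA.contains c = true := (mem_single_iff c hc9).mp hbc
        have hcrem : removableB.contains c = true := (removableB_iff c).mpr (Or.inl hcp)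
        have hstrip : stripRev (w.reverse ++ sepJ (ws.map List.reverse)) =
            stripRev (w.dropLast.reverse ++ sepJ (ws.map List.reverse)) := by
          rw [hwrev]
          have hcm : c ∈ removableB := by simpa using hcrem
          simp [stripRev, hcm]
        simp only [hbc, if_pos]
        by_cases hd : w.dropLast = []
        · have hwc : w = [c] := by rw [hwdec, hd]; rfl
          have hcpm : c ∈ punctA := by simpa using hcp
          have hpw : isPunctWord w = true := by simp [isPunctWord, hwc, hcpm]
          simp only [hd, dif_pos]
          cases ws with
          | nil =>
            rw [hBe, hstrip]
            simp [hd, sepJ, stripRev]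
          | cons v vs =>
            have hdw : (List.dropWhile isPunctWord (w :: v :: vs)) =
                List.dropWhile isPunctWord (v :: vs) := by
              simp [List.dropWhile, hpw]
            have hok' : (List.dropWhile isPunctWord (v :: vs)).head? ≠ some ([] : List Char) := by
              rw [← hdw]; exact hok
            have hv : v ≠ [] := by
              intro e
              apply hok'
              subst e
              simp [List.dropWhile, isPunctWord]
            rw [hBe, hstrip]
            have hspm : ' ' ∈ removableB := by decide
            have hsp2 : stripRev (w.dropLast.reverse ++ sepJ ((v :: vs).map List.reverse)) =
                stripRev (joinSp ((v :: vs).map List.reverse)) := by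
              rw [hd]
              simp [sepJ, stripRev, hspm]
            rw [hsp2]
            have hred : (match v :: vs with
                | [] => (none : Option (List Char))
                | v :: vs => loopA2 (v :: vs)) = loopA2 (v :: vs) := rfl
            rw [hred]
            rw [ih (v :: vs) (by simp [hwc] at hn ⊢; omega)
                (fun u hu => hg u (List.mem_cons_of_mem _ hu))
                (by simpa using hv) hok']
            simp [Bexpr, joinSp_cons]
        · simp only [hd, dif_neg, not_false_iff]
          have hgd : goodW w.dropLast := by
            constructor
            · intro hm; exact hsp (by rw [hwdec]; exact List.mem_append_left _ hm)
            · intro hm; exact hcu (by rw [hwdec]; exact List.mem_append_left _ hm)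
          have hlen : w.dropLast.length + 1 = w.length := by
            rw [hwdec]; simp
          have hipw : isPunctWord w.dropLast = isPunctWord w := isPunctWord_dropLast w hw hd hcp
          have hok2 : (List.dropWhile isPunctWord (w.dropLast :: ws)).head? ≠ some ([] : List Char) := by
            cases hpw : isPunctWord w with
            | true =>
              have h1 : List.dropWhile isPunctWord (w.dropLast :: ws) = List.dropWhile isPunctWord ws := by
                simp [List.dropWhile, hipw, hpw]
              have h2 : List.dropWhile isPunctWord (w :: ws) = List.dropWhile isPunctWord ws := by
                simp [List.dropWhile, hpw]
              rw [h1, ← h2]; exact hok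
            | false =>
              have h1 : List.dropWhile isPunctWord (w.dropLast :: ws) = w.dropLast :: ws := by
                simp [List.dropWhile, hipw, hpw]
              rw [h1]
              simpa using hd
          rw [ih (w.dropLast :: ws) (by simp at hn ⊢; omega)
              (by intro u hu
                  rcases List.mem_cons.mp hu with h | h
                  · exact h ▸ hgd
                  · exact hg u (List.mem_cons_of_mem _ h))
              (by simpa using hd) hok2]
          rw [hBe, hstrip]
          simp [Bexpr, joinSp_cons]
      · simp only [hbc, if_neg, Bool.false_eq_true, not_false_iff]
        have hcp : punctA.contains c ≠ true := fun e => hbc ((mem_single_iff c hc9).mpr e)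
        have hcsp : c ≠ ' ' := fun e => hsp (e ▸ hcmem)
        have hcrem : removableB.contains c = false := by
          cases hr : removableB.contains c with
          | false => rfl
          | true =>
            rcases (removableB_iff c).mp hr with h | h
            · exact absurd h hcp
            · exact absurd h hcsp
        rw [hBe, hwrev]
        have hcm' : c ∉ removableB := by
          intro hm
          rw [(by simpa using hm : removableB.contains c = true)] at hcrem
          exact Bool.true_eq_false.mp hcrem
        have : stripRev ((c :: w.dropLast.reverse) ++ sepJ (ws.map List.reverse)) =
            c :: (w.dropLast.reverse ++ sepJ (ws.map List.reverse)) := by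
          simp [stripRev, hcm']
        rw [this]
        have hnos : ' ' ∉ w.reverse := by simpa using hsp
        cases ws with
        | nil =>
          simp only [List.map_nil, sepJ, List.append_nil]
          rw [show c :: w.dropLast.reverse = w.reverse from hwrev.symm]
          rw [wordRev_no_space _ hnos]
          simp
        | cons v vs =>
          simp only [sepJ, List.map_cons]
          rw [show (c :: (w.dropLast.reverse ++ ' ' :: joinSp (v.reverse :: vs.map List.reverse)))
              = (w.reverse ++ ' ' :: joinSp (v.reverse :: vs.map List.reverse)) from by rw [hwrev]; simp]
          rw [wordRev_until_space _ _ hnos]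
          simp

lemma A1_eq (rev : List (List Char)) (hg : ∀ w ∈ rev, goodW w)
    (hok : ((rev.dropWhile (notToEndWith.contains ·)).dropWhile isPunctWord).head? ≠ some ([] : List Char)) :
    (match loopA1 rev with
     | none => none
     | some r => loopA2 r) = Bexpr rev := by
  induction rev with
  | nil => simp [loopA1, Bexpr, joinSp, stripRev]
  | cons w ws ih =>
    by_cases hbw : notToEndWith.contains w = true
    · have h9 : '’' ∉ w := (hg w (List.mem_cons_self ..)).2
      have hrem : ∀ c ∈ w.reverse, removableB.contains c = true := by
        intro a ha
        exact notToEnd_all_removable w hbw h9 a (List.mem_reverse.mp ha)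
      have hBe : Bexpr (w :: ws) = Bexpr ws := by
        simp only [Bexpr, List.map_cons, joinSp_cons]
        rw [stripRev_drop _ _ hrem]
        cases ws with
        | nil => simp [sepJ, joinSp, stripRev]
        | cons v vs =>
          simp only [List.map_cons, sepJ]
          rw [show stripRev (' ' :: joinSp (v.reverse :: vs.map List.reverse))
              = stripRev (joinSp (v.reverse :: vs.map List.reverse)) from by
            simp [stripRev, (by decide : ' ' ∈ removableB)]]
      rw [hBe]
      have hbm : w ∈ notToEndWith := by simpa using hbw
      have hda : List.dropWhile (notToEndWith.contains ·) (w :: ws) =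
          List.dropWhile (notToEndWith.contains ·) ws := by
        simp [List.dropWhile, hbm]
      simp only [loopA1, hbw, if_pos]
      exact ih (fun u hu => hg u (List.mem_cons_of_mem _ hu)) (by rw [← hda]; exact hok)
    · simp only [loopA1, hbw, Bool.false_eq_true, if_neg, not_false_iff]
      have hw : w ≠ [] := by
        intro e
        exact hbw (by rw [e]; decide)
      have hbm : w ∉ notToEndWith := fun hm => hbw (by simpa using hm)
      have hda : List.dropWhile (notToEndWith.contains ·) (w :: ws) = w :: ws := by
        simp [List.dropWhile, hbm]
      exact A2_eq ((((w :: ws).map List.length).sum + (w :: ws).length)) (w :: ws) le_rfl hg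
        (by simpa using hw) (by rw [← hda]; exact hok)

-- ===== VERDICT (by name: the statement is the Claim_ definition above) =====
theorem get_final_word_of_line_spec : Claim_equal_get_final_word_of_line := by
  intro line hDom hPre
  unfold Spec_get_final_word_of_line
  have h9 : '’' ∉ line.toList := by
    intro hm
    have hall : ∀ c ∈ line.toList, pvDomChar c = true := by
      simpa [Dom_get_final_word_of_line, pvDomStr, List.all_eq_true] using hDom
    have := hall _ hm
    exact absurd this (by decide)
  have hrep : (PySem.Str.replace line "’" "'").toList = line.toList := by
    rw [PySem.Str.toList_replace]
    rw [show "’".toList = ['’'] from rfl, show "'".toList = ['\''] from rfl]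
    exact replace_id _ h9
  have hgood : ∀ w ∈ (splitSp line.toList).reverse, goodW w := by
    intro w hw
    have hw' : w ∈ splitSp line.toList := List.mem_reverse.mp hw
    exact ⟨no_space_splitSp _ w hw', fun hm => h9 (subset_splitSp _ w hw' '’' hm)⟩
  have hok : ((((splitSp line.toList).reverse).dropWhile (notToEndWith.contains ·)).dropWhile
      isPunctWord).head? ≠ some ([] : List Char) := by
    have h := hPre
    unfold Pre_get_final_word_of_line pyCrashes at h
    rw [hrep, splitOn_space] at h
    simpa using h
  have hrevjoin : line.toList.reverse = joinSp (((splitSp line.toList).reverse).map List.reverse) := by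
    conv_lhs => rw [← join_splitSp line.toList]
    exact joinSp_reverse _
  have hB : get_final_word_of_line_alt line =
      (Bexpr ((splitSp line.toList).reverse)).map String.ofList := by
    simp only [get_final_word_of_line_alt, Bexpr]
    rw [hrep, hrevjoin]
    cases stripRev (joinSp (((splitSp line.toList).reverse).map List.reverse)) <;> simp
  have hA : get_final_word_of_line line =
      (match loopA1 ((splitSp line.toList).reverse) with
       | none => none
       | some r => loopA2 r).map String.ofList := by
    simp only [get_final_word_of_line]
    rw [hrep, splitOn_space]
    cases hsplit : (splitSp line.toList).reverse with
    | nil =>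
      exact absurd (by simpa using congrArg List.reverse hsplit) (splitSp_ne_nil line.toList)
    | cons w ws =>
      by_cases hw0 : w = []
      · subst hw0
        simp only [if_pos rfl]
        cases ws with
        | nil => simp [loopA1, (by decide : ([] : List Char) ∈ notToEndWith)]
        | cons v vs =>
          have h1 : loopA1 ([] :: v :: vs) = loopA1 (v :: vs) := by
            simp [loopA1, (by decide : ([] : List Char) ∈ notToEndWith)]
          rw [h1]
          cases h2 : loopA1 (v :: vs) <;> simp [h2]
      · simp only [if_neg hw0]
        cases h2 : loopA1 (w :: ws) <;> simp [h2]
  rw [hA, hB]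
  exact congrArg (Option.map String.ofList) (A1_eq _ hgood hok)
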